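-- pv_equiv track=rewrite | github.com/luyifan/ContentSearch | 信息检索包括report和代码和ppt/code/searchengine/dowithfile.py | dowithb2
-- ===== SOURCE A (Python) =====
-- def dowithb2 ( str1 ):
--
--     start = 0
--     str2 = ''
--     while( True ):
--         agostart = start
--         start = str1.find ( "[/b]" , start )
--         if ( start == -1 ):
--             break
--         str2 = str2 + str1 [ agostart : start ]
--         final = str1.find ( "]" , start )
--         start = final + 1
--     stringlen = len ( str1 )
--     str2 = str2 + str1 [ agostart : stringlen ]
--     return str2
-- ===== SOURCE B (Python) =====
-- def dowithb2(str1):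
--     return str1.replace("[/b]", "")
-- ===== Notes on version B (the rewrite author's own statement) =====
-- stated objective: idiomatic
-- what changed: Replaced the manual while-loop with a find cursor, agostart bookkeeping and repeated string concatenation by a single built-in str.replace call that removes every "[/b]" occurrence.
import Mathlib
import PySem

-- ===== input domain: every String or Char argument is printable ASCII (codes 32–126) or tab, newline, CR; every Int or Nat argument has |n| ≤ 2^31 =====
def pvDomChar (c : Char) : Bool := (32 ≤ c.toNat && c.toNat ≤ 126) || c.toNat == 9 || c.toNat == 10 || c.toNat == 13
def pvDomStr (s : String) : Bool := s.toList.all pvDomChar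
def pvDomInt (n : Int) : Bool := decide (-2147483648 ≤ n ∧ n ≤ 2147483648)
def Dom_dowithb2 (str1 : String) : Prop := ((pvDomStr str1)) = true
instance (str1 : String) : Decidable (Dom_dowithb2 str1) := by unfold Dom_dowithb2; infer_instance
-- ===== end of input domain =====

-- B replaces A's manual find-cursor loop with one built-in str.replace call (idiomatic; no speed claim proved).

-- ===== PORT A =====
-- A's while loop with its state (start, str2); the break case and the trailing
-- 'str2 + str1[agostart:stringlen]' are merged into the f = -1 branch, where
-- agostart = start (it was assigned at the top of the final iteration).
-- fuel = len+1 only makes the recursion total; it is never exhausted, since each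
-- iteration either breaks or moves start strictly forward (proved in the lemmas).
def dowithb2Loop (s : List Char) (fuel : Nat) (start : Int) (str2 : List Char) : List Char :=
  match fuel with
  | 0 => str2
  | fuel + 1 =>
    let agostart := start
    let f := PySem.Chars.findFrom s ['[', '/', 'b', ']'] start
    if f = -1 then
      str2 ++ PySem.Chars.slice s (some agostart) (some (s.length : Int))
    else
      let str2' := str2 ++ PySem.Chars.slice s (some agostart) (some f)
      let final := PySem.Chars.findFrom s [']'] f
      dowithb2Loop s fuel (final + 1) str2'

def dowithb2 (str1 : String) : String :=
  String.ofList (dowithb2Loop str1.toList (str1.toList.length + 1) 0 [])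

-- ===== PORT B =====
def dowithb2_alt (str1 : String) : String :=
  PySem.Str.replace str1 "[/b]" ""

-- ===== PRECONDITION & SPEC =====
def Spec_dowithb2 (str1 : String) (out : String) : Prop := out = dowithb2_alt str1
instance (str1 : String) (out : String) : Decidable (Spec_dowithb2 str1 out) := by unfold Spec_dowithb2; infer_instance

-- ===== CLAIM (what is proved, stated in full; the proofs are below) =====
def Claim_equal_dowithb2 : Prop := ∀ (str1 : String), Dom_dowithb2 str1 → Spec_dowithb2 str1 (dowithb2 str1)

-- ===== LEMMAS AND PROOFS =====

-- the tag
def pvPat : List Char := ['[', '/', 'b', ']']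

-- reference function: remove every occurrence of pvPat, scanning left to right
def pvStrip : List Char → List Char
  | [] => []
  | c :: t =>
    if pvPat.isPrefixOf (c :: t) then pvStrip (List.drop 4 (c :: t))
    else c :: pvStrip t
termination_by l => l.length
decreasing_by all_goals (simp only [List.length_drop, List.length_cons]; omega)

theorem pvStrip_of_no_occ (l : List Char) (h : ∀ j, ¬ pvPat <+: l.drop j) :
    pvStrip l = l := by
  induction l with
  | nil => simp [pvStrip]
  | cons c t ih =>
    have h0 : ¬ pvPat.isPrefixOf (c :: t) := by
      intro hp
      exact h 0 (by simpa using (List.isPrefixOf_iff_prefix.mp hp))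
    rw [pvStrip, if_neg h0, ih]
    intro j hj
    exact h (j + 1) (by simpa using hj)

theorem pvStrip_occ (k : Nat) : ∀ (l : List Char), pvPat <+: l.drop k →
    (∀ i < k, ¬ pvPat <+: l.drop i) →
    pvStrip l = l.take k ++ pvStrip (l.drop (k + 4)) := by
  induction k with
  | zero =>
    intro l hpre _
    simp only [List.drop_zero] at hpre
    match l, hpre with
    | c :: t, hpre =>
      rw [pvStrip, if_pos (List.isPrefixOf_iff_prefix.mpr hpre)]
      simp
  | succ k ih =>
    intro l hpre hmin
    match l with
    | [] => simp [pvPat] at hpre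
    | c :: t =>
      have h0 : ¬ pvPat.isPrefixOf (c :: t) := by
        intro hp
        exact hmin 0 (Nat.succ_pos k) (by simpa using (List.isPrefixOf_iff_prefix.mp hp))
      rw [pvStrip, if_neg h0]
      rw [ih t (by simpa using hpre) (fun i hi => by simpa using hmin (i + 1) (by omega))]
      simp [List.take_succ_cons, List.drop_succ_cons]

-- ']' is first found at offset 3 inside an occurrence of the tag
theorem find_rbracket (l : List Char) (h : pvPat <+: l) :
    PySem.Chars.find l [']'] = 3 := by
  obtain ⟨r, hr⟩ := h
  subst hr
  have hinf : [']'] <:+: pvPat ++ r := ⟨['[', '/', 'b'], r, by simp [pvPat]⟩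
  have hnn : 0 ≤ PySem.Chars.find (pvPat ++ r) [']'] :=
    (PySem.Chars.find_nonneg_iff _ _).mpr hinf
  obtain ⟨hpre, hmin⟩ := PySem.Chars.find_spec hnn
  set m := (PySem.Chars.find (pvPat ++ r) [']']).toNat with hm
  have h3 : [']'] <+: List.drop 3 (pvPat ++ r) := by simp [pvPat]
  have hle : m ≤ 3 := by
    by_contra hgt
    exact hmin 3 (by omega) h3
  interval_cases m
  · simp [pvPat] at hpre
  · simp [pvPat] at hpre
  · simp [pvPat] at hpre
  · omega

theorem pat_occ_bound (s : List Char) (f : Nat) (h : pvPat <+: s.drop f) (hf : f ≤ s.length) :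
    f + 4 ≤ s.length := by
  have := h.length_le
  simp [pvPat] at this
  omega

-- main loop invariant
theorem loop_eq (s : List Char) (fuel : Nat) : ∀ (start : Nat) (acc : List Char),
    start ≤ s.length → s.length + 1 - start ≤ fuel →
    dowithb2Loop s fuel (start : Int) acc = acc ++ pvStrip (s.drop start) := by
  induction fuel with
  | zero => intro start acc h1 h2; omega
  | succ fuel ih =>
    intro start acc h1 h2
    rw [dowithb2Loop]
    simp only [show ['[', '/', 'b', ']'] = pvPat from rfl, PySem.Chars.slice_eq_listSlice]
    rw [PySem.Chars.findFrom_natCast s pvPat start h1]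
    by_cases hfind : PySem.Chars.find (List.drop start s) pvPat = -1
    · rw [if_pos (by simp [hfind])]
      have hno : ¬ pvPat <:+: List.drop start s := by
        intro hinf
        have := (PySem.Chars.find_nonneg_iff (List.drop start s) pvPat).mpr hinf
        omega
      have : ∀ j, ¬ pvPat <+: (s.drop start).drop j := by
        intro j hj
        exact hno (by
          have : pvPat <:+: (s.drop start).drop j := hj.isInfix
          exact this.trans (List.drop_suffix j _).isInfix)
      rw [pvStrip_of_no_occ _ this]
      rw [PySem.List.slice_natCast s start s.length]
      congr 1
      exact List.take_of_length_le (by simp)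
    · have hnn : 0 ≤ PySem.Chars.find (List.drop start s) pvPat := by
        have := PySem.Chars.neg_one_le_find (List.drop start s) pvPat
        omega
      simp only [if_neg hfind]
      rw [if_neg (by omega : ¬((start : Int) + PySem.Chars.find (List.drop start s) pvPat = -1))]
      set k := (PySem.Chars.find (List.drop start s) pvPat).toNat with hk
      have hkval : PySem.Chars.find (List.drop start s) pvPat = (k : Int) := by omega
      obtain ⟨hpre, hmin⟩ := PySem.Chars.find_spec hnn
      rw [← hk] at hpre hmin
      have hpre' : pvPat <+: s.drop (start + k) := by
        have h' := hpre
        rwa [List.drop_drop] at h'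
      have hbound : start + k + 4 ≤ s.length :=
        pat_occ_bound s (start + k) hpre' (by
          have := hpre'.length_le
          by_contra hlt
          simp [List.drop_eq_nil_of_le (le_of_not_ge (fun h => hlt (by omega)))] at this
          simp [pvPat] at this)
      -- the inner findFrom: ']' is at offset 3 of the occurrence
      have hfinal : PySem.Chars.findFrom s [']'] ((start : Int) + (k : Int)) = (start : Int) + k + 3 := by
        have hsk : start + k ≤ s.length := by omega
        have := PySem.Chars.findFrom_natCast s [']'] (start + k) hsk
        push_cast at this
        rw [this, find_rbracket _ hpre']
        norm_num
      rw [hkval, hfinal]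
      have hslice : PySem.List.slice s (some (start : Int)) (some ((start : Int) + (k : Int)))
          = (s.drop start).take k := PySem.List.slice_natCast_add s start k
      rw [hslice]
      have harg : (start : Int) + (k : Int) + 3 + 1 = ((start + k + 4 : Nat) : Int) := by push_cast; ring
      rw [harg, ih (start + k + 4) _ hbound (by omega)]
      rw [pvStrip_occ k (s.drop start) hpre hmin]
      simp [List.drop_drop]
      ring_nf

-- B's side: Chars.replace with our pattern and empty replacement is pvStrip
theorem go_eq_pvStrip (fuel : Nat) : ∀ (l acc : List Char), l.length ≤ fuel →
    PySem.Chars.replace.go pvPat [] fuel l acc = acc.reverse ++ pvStrip l := by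
  induction fuel with
  | zero =>
    intro l acc h
    have : l = [] := List.eq_nil_of_length_eq_zero (by omega)
    subst this
    simp [PySem.Chars.replace.go, pvStrip]
  | succ fuel ih =>
    intro l acc h
    match l with
    | [] => simp [PySem.Chars.replace.go, pvStrip]
    | c :: t =>
      rw [PySem.Chars.replace.go]
      by_cases hp : pvPat.isPrefixOf (c :: t)
      · rw [if_pos hp]
        rw [ih _ _ (by simp [pvPat]; simp at h; omega)]
        rw [pvStrip, if_pos hp]
        simp [pvPat]
      · rw [if_neg hp]
        rw [ih _ _ (by simp at h ⊢; omega)]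
        rw [pvStrip, if_neg hp]
        simp

theorem replace_eq_pvStrip (l : List Char) :
    PySem.Chars.replace l pvPat [] = pvStrip l := by
  rw [PySem.Chars.replace]
  rw [if_neg (by simp [pvPat])]
  exact go_eq_pvStrip l.length l [] (le_refl _)

-- ===== VERDICT (by name: the statement is the Claim_ definition above) =====
theorem dowithb2_spec : Claim_equal_dowithb2 := by
  intro str1 _
  unfold Spec_dowithb2 dowithb2 dowithb2_alt
  apply String.toList_injective
  have h0 : ((0 : Nat) : Int) = (0 : Int) := rfl
  rw [← h0, loop_eq str1.toList (str1.toList.length + 1) 0 [] (by omega) (by omega)]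
  rw [PySem.Str.toList_replace]
  simp only [show ("[/b]" : String).toList = pvPat from rfl, show ("" : String).toList = ([] : List Char) from rfl]
  rw [replace_eq_pvStrip]
  simp
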